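-- pv_equiv track=rewrite | github.com/HoRiZonn0/IntelliDeployApp | fallback/validators/dockerfile_validator.py | summarize_dockerfile
-- ===== SOURCE A (Python) =====
-- def summarize_dockerfile(dockerfile_content: str) -> str | None:
--     lines = [line.strip() for line in dockerfile_content.splitlines() if line.strip()]
--     if not lines:
--         return None
--
--     summary_parts: list[str] = []
--     base_image = next((line.split(maxsplit=1)[1] for line in lines if line.upper().startswith("FROM ")), None)
--     if base_image:
--         summary_parts.append(f"base={base_image}")
--     exposed = [line.split(maxsplit=1)[1] for line in lines if line.upper().startswith("EXPOSE ")]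
--     if exposed:
--         summary_parts.append(f"ports={','.join(exposed)}")
--     command = next((line for line in lines if line.upper().startswith(("CMD ", "ENTRYPOINT "))), None)
--     if command:
--         summary_parts.append(f"command={command}")
--     return "; ".join(summary_parts) if summary_parts else "dockerfile_present"
-- ===== SOURCE B (Python) =====
-- def summarize_dockerfile(dockerfile_content: str) -> str | None:
--     base = None
--     exposed = []
--     command = None
--     seen = False
--     for raw in dockerfile_content.splitlines():
--         line = raw.strip()
--         if not line:
--             continue
--         seen = True
--         u = line.upper()
--         if base is None and u.startswith("FROM "):
--             base = line.split(maxsplit=1)[1]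
--         if u.startswith("EXPOSE "):
--             exposed.append(line.split(maxsplit=1)[1])
--         if command is None and u.startswith(("CMD ", "ENTRYPOINT ")):
--             command = line
--     if not seen:
--         return None
--     parts = []
--     if base:
--         parts.append(f"base={base}")
--     if exposed:
--         parts.append(f"ports={','.join(exposed)}")
--     if command:
--         parts.append(f"command={command}")
--     return "; ".join(parts) if parts else "dockerfile_present"
-- ===== Notes on version B (the rewrite author's own statement) =====
-- stated objective: alternative
-- what changed: Replaced A's materialized line list plus three separate scans (two next()-generators and a comprehension) with a single pass over the raw lines maintaining base/exposed/command accumulators and a seen flag.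
import Mathlib
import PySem

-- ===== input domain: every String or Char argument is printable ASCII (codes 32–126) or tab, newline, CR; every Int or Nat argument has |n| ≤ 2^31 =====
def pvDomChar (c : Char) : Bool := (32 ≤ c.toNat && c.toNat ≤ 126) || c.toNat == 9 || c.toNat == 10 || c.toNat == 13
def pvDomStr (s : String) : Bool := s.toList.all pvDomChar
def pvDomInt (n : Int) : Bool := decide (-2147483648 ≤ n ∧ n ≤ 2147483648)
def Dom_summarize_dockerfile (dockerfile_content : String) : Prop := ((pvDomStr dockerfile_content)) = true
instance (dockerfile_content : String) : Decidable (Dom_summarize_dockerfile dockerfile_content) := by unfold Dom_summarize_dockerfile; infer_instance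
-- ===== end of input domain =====

-- B is the same computation as one pass over the lines (accumulators + seen flag) instead of
-- A's materialized line list and three separate scans; same cost, different decomposition.

-- ===== PORT A =====
-- shared small helpers (the identical Python subexpressions in Source A and Source B)
-- line.upper().startswith("FROM ")
def pvIsFrom (l : String) : Bool := PySem.Str.startswith (PySem.Str.upper l) "FROM "
-- line.upper().startswith("EXPOSE ")
def pvIsExpose (l : String) : Bool := PySem.Str.startswith (PySem.Str.upper l) "EXPOSE "
-- line.upper().startswith(("CMD ", "ENTRYPOINT "))
def pvIsCmd (l : String) : Bool :=
  PySem.Str.startswith (PySem.Str.upper l) "CMD " || PySem.Str.startswith (PySem.Str.upper l) "ENTRYPOINT "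
-- line.split(maxsplit=1)[1]; the index always exists when the startswith guard holds
-- (the line is stripped, so a non-whitespace char follows the "FROM "/"EXPOSE " prefix), so the
-- `.getD ""` default is never taken on any executed input
def pvArg (l : String) : String := (PySem.List.pyGet? (PySem.Str.split₀Max l 1) 1).getD ""
-- line.strip() kept iff truthy (used by the list comprehension in A and the loop body in B)
def pvStripKeep (l : String) : Option String :=
  let t := PySem.Str.strip l
  if t = "" then none else some t

def summarize_dockerfile (dockerfile_content : String) : Option String :=
  let lines := (PySem.Str.splitlines dockerfile_content).filterMap pvStripKeep
  if lines = [] then none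
  else
    -- base_image = next((line.split(maxsplit=1)[1] for line in lines if …FROM…), None)
    let base_image := (lines.find? pvIsFrom).map pvArg
    let p1 : List String := match base_image with
      | some b => if b ≠ "" then ["base=" ++ b] else []
      | none => []
    -- exposed = [line.split(maxsplit=1)[1] for line in lines if …EXPOSE…]
    let exposed := (lines.filter pvIsExpose).map pvArg
    let p2 : List String := if exposed ≠ [] then ["ports=" ++ PySem.Str.join "," exposed] else []
    -- command = next((line for line in lines if …CMD/ENTRYPOINT…), None)
    let command := lines.find? pvIsCmd
    let p3 : List String := match command with
      | some c => if c ≠ "" then ["command=" ++ c] else []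
      | none => []
    let summary_parts := p1 ++ p2 ++ p3
    some (if summary_parts ≠ [] then PySem.Str.join "; " summary_parts else "dockerfile_present")

-- ===== PORT B =====
-- loop state: (seen, base, exposed, command)
def pvStep (st : Bool × Option String × List String × Option String) (raw : String) :
    Bool × Option String × List String × Option String :=
  match pvStripKeep raw with
  | none => st
  | some line =>
    let (_, b, e, c) := st
    ( true,
      (if b.isSome then b else if pvIsFrom line then some (pvArg line) else none),
      (if pvIsExpose line then e ++ [pvArg line] else e),
      (if c.isSome then c else if pvIsCmd line then some line else none) )

def summarize_dockerfile_alt (dockerfile_content : String) : Option String :=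
  let st := (PySem.Str.splitlines dockerfile_content).foldl pvStep (false, none, [], none)
  match st with
  | (seen, base, exposed, command) =>
    if seen = false then none
    else
      let p1 : List String := match base with
        | some b => if b ≠ "" then ["base=" ++ b] else []
        | none => []
      let p2 : List String := if exposed ≠ [] then ["ports=" ++ PySem.Str.join "," exposed] else []
      let p3 : List String := match command with
        | some c => if c ≠ "" then ["command=" ++ c] else []
        | none => []
      let parts := p1 ++ p2 ++ p3
      some (if parts ≠ [] then PySem.Str.join "; " parts else "dockerfile_present")

-- ===== PRECONDITION & SPEC =====
def Spec_summarize_dockerfile (dockerfile_content : String) (out : Option String) : Prop := out = summarize_dockerfile_alt dockerfile_content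
instance (dockerfile_content : String) (out : Option String) : Decidable (Spec_summarize_dockerfile dockerfile_content out) := by unfold Spec_summarize_dockerfile; infer_instance

-- ===== CLAIM (what is proved, stated in full; the proofs are below) =====
def Claim_equal_summarize_dockerfile : Prop := ∀ (dockerfile_content : String), Dom_summarize_dockerfile dockerfile_content → Spec_summarize_dockerfile dockerfile_content (summarize_dockerfile dockerfile_content)

-- ===== LEMMAS AND PROOFS =====

-- the single pass computes exactly A's three scans (first FROM, all EXPOSE args, first CMD/ENTRYPOINT)
theorem pvStep_foldl (raws : List String) (seen : Bool) (b c : Option String) (e : List String) :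
    raws.foldl pvStep (seen, b, e, c) =
      ( seen || (raws.filterMap pvStripKeep ≠ []),
        (if b.isSome then b else ((raws.filterMap pvStripKeep).find? pvIsFrom).map pvArg),
        e ++ ((raws.filterMap pvStripKeep).filter pvIsExpose).map pvArg,
        (if c.isSome then c else (raws.filterMap pvStripKeep).find? pvIsCmd) ) := by
  induction raws generalizing seen b e c with
  | nil => simp
  | cons r rs ih =>
    simp only [List.foldl_cons, pvStep]
    cases hr : pvStripKeep r with
    | none =>
      rw [ih]
      simp [hr]
    | some line =>
      rw [ih]
      simp only [List.filterMap_cons, hr, List.find?_cons, List.filter_cons, Prod.mk.injEq]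
      refine ⟨by simp, ?_, ?_, ?_⟩
      · cases b with
        | some bv => simp
        | none => by_cases hf : pvIsFrom line = true <;> simp [hf]
      · by_cases he : pvIsExpose line = true <;> simp [he]
      · cases c with
        | some cv => simp
        | none => by_cases hc : pvIsCmd line = true <;> simp [hc]

-- ===== VERDICT (by name: the statement is the Claim_ definition above) =====
theorem summarize_dockerfile_spec : Claim_equal_summarize_dockerfile := by
  intro s _
  unfold Spec_summarize_dockerfile summarize_dockerfile summarize_dockerfile_alt
  rw [pvStep_foldl]
  by_cases h : (PySem.Str.splitlines s).filterMap pvStripKeep = []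
  · simp [h]
  · have hd : (decide ((PySem.Str.splitlines s).filterMap pvStripKeep ≠ []) : Bool) = true := by
      simpa using h
    simp only [h, hd, Bool.false_or, if_false, reduceCtorEq, Option.isSome_none,
      Bool.false_eq_true, List.nil_append]
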